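-- pv_equiv track=rewrite | github.com/osmium0106/linkedin-automation | news_image_generator.py | generate_prompt_from_news
-- ===== SOURCE A (Python) =====
-- def generate_prompt_from_news(title: str, description: str, topic: str) -> str:
--     """
--     Generate an AI image prompt based on news content
--
--     Args:
--         title: News article title
--         description: News article description
--         topic: News topic category
--
--     Returns:
--         Generated prompt for AI image generation
--     """
--     # Extract key concepts from the news title and description
--     combined_text = f"{title} {description}".lower()
--
--     # Tech-specific keywords to look for in the news
--     tech_concepts = {
--         'ai': ['artificial intelligence', 'machine learning', 'neural network', 'deep learning', 'ai model', 'chatgpt', 'openai', 'gpt'],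
--         'robotics': ['robot', 'automation', 'robotic', 'autonomous', 'drone', 'mechanical', 'android'],
--         'blockchain': ['blockchain', 'cryptocurrency', 'bitcoin', 'ethereum', 'crypto', 'web3', 'nft'],
--         'cloud': ['cloud computing', 'aws', 'azure', 'google cloud', 'server', 'infrastructure'],
--         'mobile': ['smartphone', 'mobile', 'app', 'ios', 'android', 'iphone', 'samsung'],
--         'security': ['cybersecurity', 'security', 'hack', 'breach', 'privacy', 'encryption'],
--         'data': ['data science', 'analytics', 'big data', 'database', 'visualization'],
--         'software': ['software', 'programming', 'code', 'developer', 'framework', 'api'],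
--         'startup': ['startup', 'funding', 'investment', 'vc', 'entrepreneur', 'innovation'],
--         'business': ['business', 'company', 'corporate', 'market', 'industry', 'revenue']
--     }
--
--     # Identify the main concept from the news
--     detected_concepts = []
--     for concept, keywords in tech_concepts.items():
--         for keyword in keywords:
--             if keyword in combined_text:
--                 detected_concepts.append(concept)
--                 break
--
--     # Create a specific prompt based on detected concepts and actual news content
--     if 'ai' in detected_concepts:
--         base_prompt = "Professional AI and machine learning technology, futuristic neural networks with glowing connections, modern tech interface, blue and purple gradient background, digital innovation theme"
--     elif 'robotics' in detected_concepts: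
--         base_prompt = "Advanced robotics and automation technology, sleek modern robots, industrial automation, clean futuristic design, metallic surfaces with blue accents"
--     elif 'blockchain' in detected_concepts:
--         base_prompt = "Blockchain network visualization, interconnected digital blocks, cryptocurrency concept, modern financial technology, geometric patterns with blue lighting"
--     elif 'cloud' in detected_concepts:
--         base_prompt = "Cloud computing infrastructure, server networks in data centers, modern IT technology, professional business environment with blue accents"
--     elif 'mobile' in detected_concepts:
--         base_prompt = "Modern smartphone and mobile technology, sleek app interfaces, contemporary device design, digital lifestyle theme"
--     elif 'security' in detected_concepts:
--         base_prompt = "Cybersecurity and digital protection, shield with binary code, secure technology concepts, professional security theme with green accents"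
--     elif 'data' in detected_concepts:
--         base_prompt = "Data analytics and visualization, modern charts and graphs, business intelligence dashboard, professional data science theme"
--     elif 'software' in detected_concepts:
--         base_prompt = "Software development and programming, clean code interfaces, modern developer workspace, tech innovation theme"
--     elif 'startup' in detected_concepts:
--         base_prompt = "Innovation and startup growth, ascending arrows, entrepreneurship energy, modern business success visualization"
--     elif 'business' in detected_concepts:
--         base_prompt = "Professional business and corporate success, modern office environment, growth achievement theme, clean corporate aesthetic"
--     else:
--         # Default tech prompt based on the actual topic
--         base_prompt = f"Modern {topic} technology concept, abstract digital patterns, innovation and progress theme, professional tech background"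
--
--     # Add LinkedIn-specific styling and high quality parameters
--     final_prompt = f"{base_prompt}, professional LinkedIn post style, high quality, clean composition, suitable for social media, corporate aesthetic, digital art, trending on artstation"
--
--     return final_prompt
-- ===== SOURCE B (Python) =====
-- # B: a single flat keyword->prompt lookup list (concept order preserved); the first
-- # keyword found in the text selects the prompt directly -- no concept detection pass,
-- # no grouped dict, no if/elif chain.
--
-- AI = "Professional AI and machine learning technology, futuristic neural networks with glowing connections, modern tech interface, blue and purple gradient background, digital innovation theme"
-- ROBOTICS = "Advanced robotics and automation technology, sleek modern robots, industrial automation, clean futuristic design, metallic surfaces with blue accents"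
-- BLOCKCHAIN = "Blockchain network visualization, interconnected digital blocks, cryptocurrency concept, modern financial technology, geometric patterns with blue lighting"
-- CLOUD = "Cloud computing infrastructure, server networks in data centers, modern IT technology, professional business environment with blue accents"
-- MOBILE = "Modern smartphone and mobile technology, sleek app interfaces, contemporary device design, digital lifestyle theme"
-- SECURITY = "Cybersecurity and digital protection, shield with binary code, secure technology concepts, professional security theme with green accents"
-- DATA = "Data analytics and visualization, modern charts and graphs, business intelligence dashboard, professional data science theme"
-- SOFTWARE = "Software development and programming, clean code interfaces, modern developer workspace, tech innovation theme"
-- STARTUP = "Innovation and startup growth, ascending arrows, entrepreneurship energy, modern business success visualization"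
-- BUSINESS = "Professional business and corporate success, modern office environment, growth achievement theme, clean corporate aesthetic"
--
-- SUFFIX = ", professional LinkedIn post style, high quality, clean composition, suitable for social media, corporate aesthetic, digital art, trending on artstation"
--
-- # Flat priority list: all keywords of a higher-priority concept precede those of any
-- # lower-priority one, so the FIRST matching pair picks the same prompt as A's scheme.
-- KEYWORD_PROMPTS = [
--     ("artificial intelligence", AI), ("machine learning", AI), ("neural network", AI),
--     ("deep learning", AI), ("ai model", AI), ("chatgpt", AI), ("openai", AI), ("gpt", AI),
--     ("robot", ROBOTICS), ("automation", ROBOTICS), ("robotic", ROBOTICS), ("autonomous", ROBOTICS),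
--     ("drone", ROBOTICS), ("mechanical", ROBOTICS), ("android", ROBOTICS),
--     ("blockchain", BLOCKCHAIN), ("cryptocurrency", BLOCKCHAIN), ("bitcoin", BLOCKCHAIN),
--     ("ethereum", BLOCKCHAIN), ("crypto", BLOCKCHAIN), ("web3", BLOCKCHAIN), ("nft", BLOCKCHAIN),
--     ("cloud computing", CLOUD), ("aws", CLOUD), ("azure", CLOUD), ("google cloud", CLOUD),
--     ("server", CLOUD), ("infrastructure", CLOUD),
--     ("smartphone", MOBILE), ("mobile", MOBILE), ("app", MOBILE), ("ios", MOBILE),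
--     ("android", MOBILE), ("iphone", MOBILE), ("samsung", MOBILE),
--     ("cybersecurity", SECURITY), ("security", SECURITY), ("hack", SECURITY),
--     ("breach", SECURITY), ("privacy", SECURITY), ("encryption", SECURITY),
--     ("data science", DATA), ("analytics", DATA), ("big data", DATA),
--     ("database", DATA), ("visualization", DATA),
--     ("software", SOFTWARE), ("programming", SOFTWARE), ("code", SOFTWARE),
--     ("developer", SOFTWARE), ("framework", SOFTWARE), ("api", SOFTWARE),
--     ("startup", STARTUP), ("funding", STARTUP), ("investment", STARTUP),
--     ("vc", STARTUP), ("entrepreneur", STARTUP), ("innovation", STARTUP),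
--     ("business", BUSINESS), ("company", BUSINESS), ("corporate", BUSINESS),
--     ("market", BUSINESS), ("industry", BUSINESS), ("revenue", BUSINESS),
-- ]
--
--
-- def generate_prompt_from_news(title: str, description: str, topic: str) -> str:
--     text = f"{title} {description}".lower()
--     base = next(
--         (prompt for kw, prompt in KEYWORD_PROMPTS if kw in text),
--         f"Modern {topic} technology concept, abstract digital patterns, innovation and progress theme, professional tech background",
--     )
--     return base + SUFFIX
-- ===== Notes on version B (the rewrite author's own statement) =====
-- stated objective: simpler
-- what changed: Replaces A's grouped concept dict, detected_concepts collection pass and 10-way if/elif chain with one flat keyword-to-prompt priority list scanned once; the first keyword found in the text selects the prompt directly (correct because all keywords of a higher-priority concept precede those of lower-priority ones).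
import Mathlib
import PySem

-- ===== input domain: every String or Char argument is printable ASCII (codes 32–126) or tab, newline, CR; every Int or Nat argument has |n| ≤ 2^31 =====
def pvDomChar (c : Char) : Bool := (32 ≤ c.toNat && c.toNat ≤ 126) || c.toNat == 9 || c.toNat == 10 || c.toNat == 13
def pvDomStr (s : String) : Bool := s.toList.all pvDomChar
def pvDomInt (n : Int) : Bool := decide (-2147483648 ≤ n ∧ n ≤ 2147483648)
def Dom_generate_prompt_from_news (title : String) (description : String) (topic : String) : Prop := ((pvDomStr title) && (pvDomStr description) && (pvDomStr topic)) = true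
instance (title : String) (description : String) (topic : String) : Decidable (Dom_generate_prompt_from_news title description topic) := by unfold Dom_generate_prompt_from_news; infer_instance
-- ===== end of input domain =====

-- B replaces A's grouped concept dict + detected_concepts pass + 10-way if/elif chain
-- with one flat keyword->prompt priority list scanned once, first match wins (objective: simpler).

-- shared literal constants (the prompt strings both Python versions contain verbatim)
def pvPrompt_ai : String := "Professional AI and machine learning technology, futuristic neural networks with glowing connections, modern tech interface, blue and purple gradient background, digital innovation theme"
def pvPrompt_robotics : String := "Advanced robotics and automation technology, sleek modern robots, industrial automation, clean futuristic design, metallic surfaces with blue accents"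
def pvPrompt_blockchain : String := "Blockchain network visualization, interconnected digital blocks, cryptocurrency concept, modern financial technology, geometric patterns with blue lighting"
def pvPrompt_cloud : String := "Cloud computing infrastructure, server networks in data centers, modern IT technology, professional business environment with blue accents"
def pvPrompt_mobile : String := "Modern smartphone and mobile technology, sleek app interfaces, contemporary device design, digital lifestyle theme"
def pvPrompt_security : String := "Cybersecurity and digital protection, shield with binary code, secure technology concepts, professional security theme with green accents"
def pvPrompt_data : String := "Data analytics and visualization, modern charts and graphs, business intelligence dashboard, professional data science theme"
def pvPrompt_software : String := "Software development and programming, clean code interfaces, modern developer workspace, tech innovation theme"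
def pvPrompt_startup : String := "Innovation and startup growth, ascending arrows, entrepreneurship energy, modern business success visualization"
def pvPrompt_business : String := "Professional business and corporate success, modern office environment, growth achievement theme, clean corporate aesthetic"
def pvSuffix : String := ", professional LinkedIn post style, high quality, clean composition, suitable for social media, corporate aesthetic, digital art, trending on artstation"

-- ===== PORT A =====

-- loop body of A's detection pass (named so the proof can state an invariant about it)
def pvDetectF (combined_text : String) (acc : List String) (p : String × List String) : List String :=
  if p.2.any (fun kw => PySem.Str.isIn kw combined_text) then acc ++ [p.1] else acc

-- A's dict tech_concepts, in insertion order
def pvTechConcepts : List (String × List String) := [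
  ("ai", ["artificial intelligence", "machine learning", "neural network", "deep learning", "ai model", "chatgpt", "openai", "gpt"]),
  ("robotics", ["robot", "automation", "robotic", "autonomous", "drone", "mechanical", "android"]),
  ("blockchain", ["blockchain", "cryptocurrency", "bitcoin", "ethereum", "crypto", "web3", "nft"]),
  ("cloud", ["cloud computing", "aws", "azure", "google cloud", "server", "infrastructure"]),
  ("mobile", ["smartphone", "mobile", "app", "ios", "android", "iphone", "samsung"]),
  ("security", ["cybersecurity", "security", "hack", "breach", "privacy", "encryption"]),
  ("data", ["data science", "analytics", "big data", "database", "visualization"]),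
  ("software", ["software", "programming", "code", "developer", "framework", "api"]),
  ("startup", ["startup", "funding", "investment", "vc", "entrepreneur", "innovation"]),
  ("business", ["business", "company", "corporate", "market", "industry", "revenue"])]

def generate_prompt_from_news (title : String) (description : String) (topic : String) : String :=
  let combined_text := PySem.Str.lower (title ++ " " ++ description)
  -- 'for keyword in keywords: if keyword in combined_text: append; break' = append iff any keyword matches
  let detected_concepts : List String := pvTechConcepts.foldl (pvDetectF combined_text) []
  let base_prompt :=
    if detected_concepts.contains "ai" then pvPrompt_ai
    else if detected_concepts.contains "robotics" then pvPrompt_robotics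
    else if detected_concepts.contains "blockchain" then pvPrompt_blockchain
    else if detected_concepts.contains "cloud" then pvPrompt_cloud
    else if detected_concepts.contains "mobile" then pvPrompt_mobile
    else if detected_concepts.contains "security" then pvPrompt_security
    else if detected_concepts.contains "data" then pvPrompt_data
    else if detected_concepts.contains "software" then pvPrompt_software
    else if detected_concepts.contains "startup" then pvPrompt_startup
    else if detected_concepts.contains "business" then pvPrompt_business
    else "Modern " ++ topic ++ " technology concept, abstract digital patterns, innovation and progress theme, professional tech background"
  base_prompt ++ pvSuffix

-- ===== PORT B =====
-- B's flat priority list: each keyword paired directly with its prompt, concept order preserved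
def pvKeywordPrompts : List (String × String) := [
  ("artificial intelligence", pvPrompt_ai), ("machine learning", pvPrompt_ai), ("neural network", pvPrompt_ai),
  ("deep learning", pvPrompt_ai), ("ai model", pvPrompt_ai), ("chatgpt", pvPrompt_ai), ("openai", pvPrompt_ai), ("gpt", pvPrompt_ai),
  ("robot", pvPrompt_robotics), ("automation", pvPrompt_robotics), ("robotic", pvPrompt_robotics), ("autonomous", pvPrompt_robotics),
  ("drone", pvPrompt_robotics), ("mechanical", pvPrompt_robotics), ("android", pvPrompt_robotics),
  ("blockchain", pvPrompt_blockchain), ("cryptocurrency", pvPrompt_blockchain), ("bitcoin", pvPrompt_blockchain),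
  ("ethereum", pvPrompt_blockchain), ("crypto", pvPrompt_blockchain), ("web3", pvPrompt_blockchain), ("nft", pvPrompt_blockchain),
  ("cloud computing", pvPrompt_cloud), ("aws", pvPrompt_cloud), ("azure", pvPrompt_cloud), ("google cloud", pvPrompt_cloud),
  ("server", pvPrompt_cloud), ("infrastructure", pvPrompt_cloud),
  ("smartphone", pvPrompt_mobile), ("mobile", pvPrompt_mobile), ("app", pvPrompt_mobile), ("ios", pvPrompt_mobile),
  ("android", pvPrompt_mobile), ("iphone", pvPrompt_mobile), ("samsung", pvPrompt_mobile),
  ("cybersecurity", pvPrompt_security), ("security", pvPrompt_security), ("hack", pvPrompt_security),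
  ("breach", pvPrompt_security), ("privacy", pvPrompt_security), ("encryption", pvPrompt_security),
  ("data science", pvPrompt_data), ("analytics", pvPrompt_data), ("big data", pvPrompt_data),
  ("database", pvPrompt_data), ("visualization", pvPrompt_data),
  ("software", pvPrompt_software), ("programming", pvPrompt_software), ("code", pvPrompt_software),
  ("developer", pvPrompt_software), ("framework", pvPrompt_software), ("api", pvPrompt_software),
  ("startup", pvPrompt_startup), ("funding", pvPrompt_startup), ("investment", pvPrompt_startup),
  ("vc", pvPrompt_startup), ("entrepreneur", pvPrompt_startup), ("innovation", pvPrompt_startup),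
  ("business", pvPrompt_business), ("company", pvPrompt_business), ("corporate", pvPrompt_business),
  ("market", pvPrompt_business), ("industry", pvPrompt_business), ("revenue", pvPrompt_business)]

-- Source B's generator-with-default: first pair whose keyword occurs in the text
def pvFirstPrompt (text : String) : List (String × String) → Option String
  | [] => none
  | e :: rest => if PySem.Str.isIn e.1 text then some e.2 else pvFirstPrompt text rest

def generate_prompt_from_news_alt (title : String) (description : String) (topic : String) : String :=
  let text := PySem.Str.lower (title ++ " " ++ description)
  let base :=
    match pvFirstPrompt text pvKeywordPrompts with
    | some p => p
    | none => "Modern " ++ topic ++ " technology concept, abstract digital patterns, innovation and progress theme, professional tech background"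
  base ++ pvSuffix

-- ===== PRECONDITION & SPEC =====
def Spec_generate_prompt_from_news (title : String) (description : String) (topic : String) (out : String) : Prop := out = generate_prompt_from_news_alt title description topic
instance (title : String) (description : String) (topic : String) (out : String) : Decidable (Spec_generate_prompt_from_news title description topic out) := by unfold Spec_generate_prompt_from_news; infer_instance

-- ===== CLAIM (what is proved, stated in full; the proofs are below) =====
def Claim_equal_generate_prompt_from_news : Prop := ∀ (title : String) (description : String) (topic : String), Dom_generate_prompt_from_news title description topic → Spec_generate_prompt_from_news title description topic (generate_prompt_from_news title description topic)

-- ===== LEMMAS AND PROOFS =====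

-- A's detection pass: x is detected iff some concept named x has a matching keyword
theorem pvContains_detect (c x : String) (l : List (String × List String)) (acc : List String) :
  (l.foldl (pvDetectF c) acc).contains x
    = (acc.contains x || l.any (fun p => x == p.1 && p.2.any (fun kw => PySem.Str.isIn kw c))) := by
  induction l generalizing acc with
  | nil => simp
  | cons p t ih =>
    simp only [List.foldl_cons, List.any_cons, pvDetectF]
    by_cases h : (p.2.any (fun kw => PySem.Str.isIn kw c)) = true
    · rw [if_pos h]
      simp only [ih, h, List.contains_append, List.contains_cons, List.contains_nil,
        Bool.or_false, Bool.and_true, Bool.or_assoc]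
    · rw [if_neg h]
      rw [Bool.not_eq_true] at h
      simp only [ih, h, Bool.and_false, Bool.false_or]

theorem pvC_ai (c : String) :
  (pvTechConcepts.foldl (pvDetectF c) []).contains "ai"
    = (["artificial intelligence", "machine learning", "neural network", "deep learning", "ai model", "chatgpt", "openai", "gpt"] : List String).any (fun kw => PySem.Str.isIn kw c) := by
  rw [pvContains_detect]
  simp only [pvTechConcepts, List.any_cons, List.any_nil, List.contains_nil,
    String.reduceBEq, Bool.true_and, Bool.false_and, Bool.or_false, Bool.false_or]

theorem pvC_robotics (c : String) :
  (pvTechConcepts.foldl (pvDetectF c) []).contains "robotics"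
    = (["robot", "automation", "robotic", "autonomous", "drone", "mechanical", "android"] : List String).any (fun kw => PySem.Str.isIn kw c) := by
  rw [pvContains_detect]
  simp only [pvTechConcepts, List.any_cons, List.any_nil, List.contains_nil,
    String.reduceBEq, Bool.true_and, Bool.false_and, Bool.or_false, Bool.false_or]

theorem pvC_blockchain (c : String) :
  (pvTechConcepts.foldl (pvDetectF c) []).contains "blockchain"
    = (["blockchain", "cryptocurrency", "bitcoin", "ethereum", "crypto", "web3", "nft"] : List String).any (fun kw => PySem.Str.isIn kw c) := by
  rw [pvContains_detect]
  simp only [pvTechConcepts, List.any_cons, List.any_nil, List.contains_nil,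
    String.reduceBEq, Bool.true_and, Bool.false_and, Bool.or_false, Bool.false_or]

theorem pvC_cloud (c : String) :
  (pvTechConcepts.foldl (pvDetectF c) []).contains "cloud"
    = (["cloud computing", "aws", "azure", "google cloud", "server", "infrastructure"] : List String).any (fun kw => PySem.Str.isIn kw c) := by
  rw [pvContains_detect]
  simp only [pvTechConcepts, List.any_cons, List.any_nil, List.contains_nil,
    String.reduceBEq, Bool.true_and, Bool.false_and, Bool.or_false, Bool.false_or]

theorem pvC_mobile (c : String) :
  (pvTechConcepts.foldl (pvDetectF c) []).contains "mobile"
    = (["smartphone", "mobile", "app", "ios", "android", "iphone", "samsung"] : List String).any (fun kw => PySem.Str.isIn kw c) := by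
  rw [pvContains_detect]
  simp only [pvTechConcepts, List.any_cons, List.any_nil, List.contains_nil,
    String.reduceBEq, Bool.true_and, Bool.false_and, Bool.or_false, Bool.false_or]

theorem pvC_security (c : String) :
  (pvTechConcepts.foldl (pvDetectF c) []).contains "security"
    = (["cybersecurity", "security", "hack", "breach", "privacy", "encryption"] : List String).any (fun kw => PySem.Str.isIn kw c) := by
  rw [pvContains_detect]
  simp only [pvTechConcepts, List.any_cons, List.any_nil, List.contains_nil,
    String.reduceBEq, Bool.true_and, Bool.false_and, Bool.or_false, Bool.false_or]

theorem pvC_data (c : String) :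
  (pvTechConcepts.foldl (pvDetectF c) []).contains "data"
    = (["data science", "analytics", "big data", "database", "visualization"] : List String).any (fun kw => PySem.Str.isIn kw c) := by
  rw [pvContains_detect]
  simp only [pvTechConcepts, List.any_cons, List.any_nil, List.contains_nil,
    String.reduceBEq, Bool.true_and, Bool.false_and, Bool.or_false, Bool.false_or]

theorem pvC_software (c : String) :
  (pvTechConcepts.foldl (pvDetectF c) []).contains "software"
    = (["software", "programming", "code", "developer", "framework", "api"] : List String).any (fun kw => PySem.Str.isIn kw c) := by
  rw [pvContains_detect]
  simp only [pvTechConcepts, List.any_cons, List.any_nil, List.contains_nil,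
    String.reduceBEq, Bool.true_and, Bool.false_and, Bool.or_false, Bool.false_or]

theorem pvC_startup (c : String) :
  (pvTechConcepts.foldl (pvDetectF c) []).contains "startup"
    = (["startup", "funding", "investment", "vc", "entrepreneur", "innovation"] : List String).any (fun kw => PySem.Str.isIn kw c) := by
  rw [pvContains_detect]
  simp only [pvTechConcepts, List.any_cons, List.any_nil, List.contains_nil,
    String.reduceBEq, Bool.true_and, Bool.false_and, Bool.or_false, Bool.false_or]

theorem pvC_business (c : String) :
  (pvTechConcepts.foldl (pvDetectF c) []).contains "business"
    = (["business", "company", "corporate", "market", "industry", "revenue"] : List String).any (fun kw => PySem.Str.isIn kw c) := by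
  rw [pvContains_detect]
  simp only [pvTechConcepts, List.any_cons, List.any_nil, List.contains_nil,
    String.reduceBEq, Bool.true_and, Bool.false_and, Bool.or_false, Bool.false_or]

-- B's flat scan over one concept's block of keywords: some prompt iff any keyword matches
theorem pvFirst_block (c p : String) (kws : List String) (rest : List (String × String)) :
  pvFirstPrompt c (kws.map (fun k => (k, p)) ++ rest)
    = if kws.any (fun kw => PySem.Str.isIn kw c) then some p else pvFirstPrompt c rest := by
  induction kws with
  | nil => simp
  | cons k t ih =>
    simp only [List.map_cons, List.cons_append, pvFirstPrompt, List.any_cons, Bool.or_eq_true]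
    by_cases h : PySem.Str.isIn k c = true
    · rw [if_pos h, if_pos (Or.inl h)]
    · rw [if_neg h, ih]
      by_cases h2 : (t.any fun kw => PySem.Str.isIn kw c) = true
      · rw [if_pos h2, if_pos (Or.inr h2)]
      · rw [if_neg h2, if_neg (not_or.mpr ⟨h, h2⟩)]

-- the flat list is the concatenation of the ten concept blocks
theorem pvFlat_eq : pvKeywordPrompts =
    ((["artificial intelligence", "machine learning", "neural network", "deep learning", "ai model", "chatgpt", "openai", "gpt"] : List String).map (fun k => (k, pvPrompt_ai))) ++
    ((["robot", "automation", "robotic", "autonomous", "drone", "mechanical", "android"] : List String).map (fun k => (k, pvPrompt_robotics))) ++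
    ((["blockchain", "cryptocurrency", "bitcoin", "ethereum", "crypto", "web3", "nft"] : List String).map (fun k => (k, pvPrompt_blockchain))) ++
    ((["cloud computing", "aws", "azure", "google cloud", "server", "infrastructure"] : List String).map (fun k => (k, pvPrompt_cloud))) ++
    ((["smartphone", "mobile", "app", "ios", "android", "iphone", "samsung"] : List String).map (fun k => (k, pvPrompt_mobile))) ++
    ((["cybersecurity", "security", "hack", "breach", "privacy", "encryption"] : List String).map (fun k => (k, pvPrompt_security))) ++
    ((["data science", "analytics", "big data", "database", "visualization"] : List String).map (fun k => (k, pvPrompt_data))) ++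
    ((["software", "programming", "code", "developer", "framework", "api"] : List String).map (fun k => (k, pvPrompt_software))) ++
    ((["startup", "funding", "investment", "vc", "entrepreneur", "innovation"] : List String).map (fun k => (k, pvPrompt_startup))) ++
    ((["business", "company", "corporate", "market", "industry", "revenue"] : List String).map (fun k => (k, pvPrompt_business))) ++ ([] : List (String × String)) := by
  rfl

-- ===== VERDICT (by name: the statement is the Claim_ definition above) =====
theorem generate_prompt_from_news_spec : Claim_equal_generate_prompt_from_news := by
  intro title description topic _
  unfold Spec_generate_prompt_from_news generate_prompt_from_news generate_prompt_from_news_alt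
  generalize PySem.Str.lower (title ++ " " ++ description) = c
  rw [pvFlat_eq]
  simp only [List.append_assoc]
  rw [pvFirst_block, pvFirst_block, pvFirst_block, pvFirst_block, pvFirst_block,
    pvFirst_block, pvFirst_block, pvFirst_block, pvFirst_block, pvFirst_block]
  rw [pvC_ai c, pvC_robotics c, pvC_blockchain c, pvC_cloud c, pvC_mobile c,
    pvC_security c, pvC_data c, pvC_software c, pvC_startup c, pvC_business c]
  simp only [pvFirstPrompt]
  by_cases h1 : ((["artificial intelligence", "machine learning", "neural network", "deep learning", "ai model", "chatgpt", "openai", "gpt"] : List String).any (fun kw => PySem.Str.isIn kw c)) = true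
  · rw [if_pos h1, if_pos h1]
  · rw [if_neg h1, if_neg h1]
    by_cases h2 : ((["robot", "automation", "robotic", "autonomous", "drone", "mechanical", "android"] : List String).any (fun kw => PySem.Str.isIn kw c)) = true
    · rw [if_pos h2, if_pos h2]
    · rw [if_neg h2, if_neg h2]
      by_cases h3 : ((["blockchain", "cryptocurrency", "bitcoin", "ethereum", "crypto", "web3", "nft"] : List String).any (fun kw => PySem.Str.isIn kw c)) = true
      · rw [if_pos h3, if_pos h3]
      · rw [if_neg h3, if_neg h3]
        by_cases h4 : ((["cloud computing", "aws", "azure", "google cloud", "server", "infrastructure"] : List String).any (fun kw => PySem.Str.isIn kw c)) = true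
        · rw [if_pos h4, if_pos h4]
        · rw [if_neg h4, if_neg h4]
          by_cases h5 : ((["smartphone", "mobile", "app", "ios", "android", "iphone", "samsung"] : List String).any (fun kw => PySem.Str.isIn kw c)) = true
          · rw [if_pos h5, if_pos h5]
          · rw [if_neg h5, if_neg h5]
            by_cases h6 : ((["cybersecurity", "security", "hack", "breach", "privacy", "encryption"] : List String).any (fun kw => PySem.Str.isIn kw c)) = true
            · rw [if_pos h6, if_pos h6]
            · rw [if_neg h6, if_neg h6]
              by_cases h7 : ((["data science", "analytics", "big data", "database", "visualization"] : List String).any (fun kw => PySem.Str.isIn kw c)) = true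
              · rw [if_pos h7, if_pos h7]
              · rw [if_neg h7, if_neg h7]
                by_cases h8 : ((["software", "programming", "code", "developer", "framework", "api"] : List String).any (fun kw => PySem.Str.isIn kw c)) = true
                · rw [if_pos h8, if_pos h8]
                · rw [if_neg h8, if_neg h8]
                  by_cases h9 : ((["startup", "funding", "investment", "vc", "entrepreneur", "innovation"] : List String).any (fun kw => PySem.Str.isIn kw c)) = true
                  · rw [if_pos h9, if_pos h9]
                  · rw [if_neg h9, if_neg h9]
                    by_cases h10 : ((["business", "company", "corporate", "market", "industry", "revenue"] : List String).any (fun kw => PySem.Str.isIn kw c)) = true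
                    · rw [if_pos h10, if_pos h10]
                    · rw [if_neg h10, if_neg h10]
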